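-- pv_equiv track=rewrite | github.com/kidusshun/competitive-programming | leetcode solutions/card-flipping-game.py | flipgame
-- ===== SOURCE A (Python) =====
-- from typing import List
--
-- def flipgame(fronts: List[int], backs: List[int]) -> int:
--     doubles = set()
--     for front, back in zip(fronts,backs):
--         if front == back:
--             doubles.add(front)
--     ans = float("inf")
--     for num in fronts+backs:
--         if num not in doubles:
--             ans = min(ans, num)
--     if ans == float("inf"):
--         return 0
--     return ans
-- ===== SOURCE B (Python) =====
-- def flipgame(fronts, backs):
--     doubles = set()
--     for f, b in zip(fronts, backs):
--         if f == b:
--             doubles.add(f)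
--     for v in sorted(fronts + backs):
--         if v not in doubles:
--             return v
--     return 0
-- ===== Notes on version B (the rewrite author's own statement) =====
-- stated objective: alternative
-- what changed: Replaces A's running-min accumulator (with an infinity sentinel) by sorting all card values and returning the first sorted value not in the doubles set, 0 if none.
import Mathlib
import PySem

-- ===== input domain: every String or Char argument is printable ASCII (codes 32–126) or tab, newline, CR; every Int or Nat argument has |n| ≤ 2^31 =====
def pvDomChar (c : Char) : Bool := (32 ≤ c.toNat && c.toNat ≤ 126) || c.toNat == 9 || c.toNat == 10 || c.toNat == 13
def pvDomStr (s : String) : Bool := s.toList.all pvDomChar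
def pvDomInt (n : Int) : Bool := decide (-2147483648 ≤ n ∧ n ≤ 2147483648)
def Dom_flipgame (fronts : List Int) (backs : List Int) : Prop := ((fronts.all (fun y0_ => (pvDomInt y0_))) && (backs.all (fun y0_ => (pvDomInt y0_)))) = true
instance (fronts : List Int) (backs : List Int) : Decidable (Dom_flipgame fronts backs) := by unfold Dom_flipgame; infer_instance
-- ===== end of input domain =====

-- B replaces A's running-min accumulator (infinity sentinel) by a sort-then-first-valid scan; alternative decomposition, same results.


-- ===== PORT A =====
-- doubles = set(); for front, back in zip(fronts, backs): if front == back: doubles.add(front)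
-- (both Pythons build 'doubles' with this identical first pass, so the helper is shared)
def flipDoubles (fronts : List Int) (backs : List Int) : PySem.Set Int :=
  (fronts.zip backs).foldl
    (fun doubles fb => if fb.1 = fb.2 then PySem.Set.add doubles fb.1 else doubles)
    PySem.Set.empty

-- the body of A's loop: 'if num not in doubles: ans = min(ans, num)';
-- 'ans = float("inf")' is modelled as 'none', min lifted through the Option.
def flipStep (doubles : PySem.Set Int) (ans : Option Int) (num : Int) : Option Int :=
  if PySem.Set.contains doubles num then ans
  else match ans with
    | none => some num
    | some a => some (min a num)

def flipgame (fronts : List Int) (backs : List Int) : Int :=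
  match (fronts ++ backs).foldl (flipStep (flipDoubles fronts backs)) none with
  | none => 0
  | some a => a

-- ===== PORT B =====
-- 'for v in sorted(fronts + backs): if v not in doubles: return v / return 0'
def flipgameScan (doubles : PySem.Set Int) : List Int → Int
  | [] => 0
  | v :: rest => if PySem.Set.contains doubles v then flipgameScan doubles rest else v

def flipgame_alt (fronts : List Int) (backs : List Int) : Int :=
  flipgameScan (flipDoubles fronts backs)
    (PySem.List.sorted (fronts ++ backs) (fun x => x) false)

-- ===== PRECONDITION & SPEC =====
def Spec_flipgame (fronts : List Int) (backs : List Int) (out : Int) : Prop := out = flipgame_alt fronts backs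
instance (fronts : List Int) (backs : List Int) (out : Int) : Decidable (Spec_flipgame fronts backs out) := by unfold Spec_flipgame; infer_instance

-- ===== CLAIM (what is proved, stated in full; the proofs are below) =====
def Claim_equal_flipgame : Prop := ∀ (fronts : List Int) (backs : List Int), Dom_flipgame fronts backs → Spec_flipgame fronts backs (flipgame fronts backs)

-- ===== LEMMAS AND PROOFS =====

theorem foldl_min_mem (t : List Int) (a : Int) : t.foldl min a ∈ a :: t := by
  induction t generalizing a with
  | nil => simp
  | cons x t ih =>
    have h := ih (min a x)
    rcases List.mem_cons.1 h with h' | h'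
    · rcases le_total a x with hle | hle
      · rw [List.foldl_cons]; exact List.mem_cons.2 (Or.inl (h'.trans (min_eq_left hle)))
      · rw [List.foldl_cons]
        exact List.mem_cons.2 (Or.inr (List.mem_cons.2 (Or.inl (h'.trans (min_eq_right hle)))))
    · rw [List.foldl_cons]; exact List.mem_cons.2 (Or.inr (List.mem_cons.2 (Or.inr h')))

theorem foldl_min_le (t : List Int) (a : Int) : ∀ y ∈ a :: t, t.foldl min a ≤ y := by
  induction t generalizing a with
  | nil => intro y hy; simp at hy; simp [hy]
  | cons x t ih =>
    intro y hy
    rcases List.mem_cons.1 hy with h' | h'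
    · calc List.foldl min a (x :: t) = List.foldl min (min a x) t := by rw [List.foldl_cons]
        _ ≤ min a x := ih _ _ List.mem_cons_self
        _ ≤ a := min_le_left _ _
        _ = y := h'.symm
    · rcases List.mem_cons.1 h' with h'' | h''
      · calc List.foldl min a (x :: t) = List.foldl min (min a x) t := by rw [List.foldl_cons]
          _ ≤ min a x := ih _ _ List.mem_cons_self
          _ ≤ x := min_le_right _ _
          _ = y := h''.symm
      · rw [List.foldl_cons]; exact ih (min a x) y (List.mem_cons_of_mem _ h'')

-- A's loop, started from 'some a', is the running min over the surviving elements.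
theorem foldl_flipStep_some (dbl : PySem.Set Int) (l : List Int) (a : Int) :
    l.foldl (flipStep dbl) (some a)
      = some ((l.filter (fun x => !PySem.Set.contains dbl x)).foldl min a) := by
  induction l generalizing a with
  | nil => rfl
  | cons x t ih =>
    rw [List.foldl_cons, List.filter_cons]
    cases h : PySem.Set.contains dbl x with
    | true =>
      have hstep : flipStep dbl (some a) x = some a := by unfold flipStep; rw [h]; simp
      rw [hstep, Bool.not_true, if_neg Bool.false_ne_true]
      exact ih a
    | false =>
      have hstep : flipStep dbl (some a) x = some (min a x) := by unfold flipStep; rw [h]; simp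
      rw [hstep, Bool.not_false, if_pos rfl, List.foldl_cons]
      exact ih (min a x)

-- A's loop from the infinity sentinel, characterised by the filtered list.
theorem foldl_flipStep_none (dbl : PySem.Set Int) (l : List Int) :
    l.foldl (flipStep dbl) none
      = match l.filter (fun x => !PySem.Set.contains dbl x) with
        | [] => none
        | x :: xs => some (xs.foldl min x) := by
  induction l with
  | nil => rfl
  | cons x t ih =>
    rw [List.foldl_cons, List.filter_cons]
    cases h : PySem.Set.contains dbl x with
    | true =>
      have hstep : flipStep dbl none x = none := by unfold flipStep; rw [h]; simp
      rw [hstep, Bool.not_true, if_neg Bool.false_ne_true]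
      exact ih
    | false =>
      have hstep : flipStep dbl none x = some x := by unfold flipStep; rw [h]; simp
      rw [hstep, Bool.not_false, if_pos rfl, foldl_flipStep_some]

-- B's scan returns the first surviving element of its input (0 if none).
theorem flipgameScan_eq_filter (dbl : PySem.Set Int) (s : List Int) :
    flipgameScan dbl s
      = match s.filter (fun x => !PySem.Set.contains dbl x) with
        | [] => 0
        | x :: _ => x := by
  induction s with
  | nil => rfl
  | cons v rest ih =>
    rw [List.filter_cons]
    cases h : PySem.Set.contains dbl v with
    | true =>
      rw [show flipgameScan dbl (v :: rest) = flipgameScan dbl rest by rw [flipgameScan, h]; simp]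
      rw [Bool.not_true, if_neg Bool.false_ne_true]
      exact ih
    | false =>
      rw [show flipgameScan dbl (v :: rest) = v by rw [flipgameScan, h]; simp]
      rw [Bool.not_false, if_pos rfl]

theorem flipgame_spec : Claim_equal_flipgame := by
  intro fronts backs _
  unfold Spec_flipgame flipgame flipgame_alt
  set dbl := flipDoubles fronts backs with hdbl
  set l := fronts ++ backs with hl
  rw [foldl_flipStep_none, flipgameScan_eq_filter]
  set p : Int → Bool := fun x => !PySem.Set.contains dbl x with hp
  have hperm : ((PySem.List.sorted l (fun x => x) false).filter p).Perm (l.filter p) :=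
    (PySem.List.sorted_perm l (fun x => x) false).filter p
  cases hm : l.filter p with
  | nil =>
    have h0 : (PySem.List.sorted l (fun x => x) false).filter p = [] := by
      rw [hm] at hperm; exact List.Perm.eq_nil hperm
    simp [h0]
  | cons x xs =>
    cases hm' : (PySem.List.sorted l (fun x => x) false).filter p with
    | nil =>
      rw [hm', hm] at hperm
      exact absurd (List.Perm.nil_eq hperm) (by simp)
    | cons y ys =>
      -- y is the head of a ≤-sorted rearrangement of x :: xs; show xs.foldl min x = y
      have hperm' : (y :: ys).Perm (x :: xs) := by rw [← hm', ← hm]; exact hperm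
      have hsorted : ((PySem.List.sorted l (fun x => x) false).filter p).Pairwise (· ≤ ·) :=
        List.Pairwise.filter _ (PySem.List.sorted_pairwise l (fun x => x))
      rw [hm'] at hsorted
      have hy_le' : ∀ z ∈ x :: xs, y ≤ z := by
        intro z hz
        rcases List.mem_cons.1 (hperm'.mem_iff.2 hz) with rfl | hz'
        · exact le_refl _
        · exact (List.pairwise_cons.1 hsorted).1 z hz'
      have hy_mem : y ∈ x :: xs := hperm'.mem_iff.1 List.mem_cons_self
      have h1 : y ≤ xs.foldl min x := hy_le' _ (foldl_min_mem xs x)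
      have h2 : xs.foldl min x ≤ y := foldl_min_le xs x y hy_mem
      simp [le_antisymm h2 h1]
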